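-- pv_equiv track=rewrite | github.com/siftarrdev/siftarr | app/siftarr/services/plex_polling_service/identity.py | _extract_guid_ids
-- ===== SOURCE A (Python) =====
-- def _extract_guid_ids(item: dict[str, object]) -> tuple[int | None, int | None]:
--     tmdb_id: int | None = None
--     tvdb_id: int | None = None
--
--     guid_values = item.get("guids")
--     for guid in guid_values if isinstance(guid_values, tuple | list) else ():
--         guid_value = str(guid)
--         prefix, _, raw_id = guid_value.partition("://")
--         if not raw_id.isdigit():
--             continue
--         if prefix in {"tmdb", "com.plexapp.agents.themoviedb"} and tmdb_id is None:
--             tmdb_id = int(raw_id)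
--         if prefix in {"tvdb", "com.plexapp.agents.thetvdb"} and tvdb_id is None:
--             tvdb_id = int(raw_id)
--     return tmdb_id, tvdb_id
-- ===== SOURCE B (Python) =====
-- _TMDB_PREFIXES = {"tmdb", "com.plexapp.agents.themoviedb"}
-- _TVDB_PREFIXES = {"tvdb", "com.plexapp.agents.thetvdb"}
--
--
-- def _first_guid_id(guids, prefixes):
--     for guid in guids:
--         prefix, _, raw_id = str(guid).partition("://")
--         if raw_id.isdigit() and prefix in prefixes:
--             return int(raw_id)
--     return None
--
--
-- def _extract_guid_ids(item: dict[str, object]) -> tuple[int | None, int | None]: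
--     guid_values = item.get("guids")
--     guids = guid_values if isinstance(guid_values, (tuple, list)) else ()
--     return _first_guid_id(guids, _TMDB_PREFIXES), _first_guid_id(guids, _TVDB_PREFIXES)
-- ===== Notes on version B (the rewrite author's own statement) =====
-- stated objective: idiomatic
-- what changed: Replaces A's single fused loop over two mutable accumulators with two independent first-match scans (one per id category), each returning early at its first hit.
import Mathlib
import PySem

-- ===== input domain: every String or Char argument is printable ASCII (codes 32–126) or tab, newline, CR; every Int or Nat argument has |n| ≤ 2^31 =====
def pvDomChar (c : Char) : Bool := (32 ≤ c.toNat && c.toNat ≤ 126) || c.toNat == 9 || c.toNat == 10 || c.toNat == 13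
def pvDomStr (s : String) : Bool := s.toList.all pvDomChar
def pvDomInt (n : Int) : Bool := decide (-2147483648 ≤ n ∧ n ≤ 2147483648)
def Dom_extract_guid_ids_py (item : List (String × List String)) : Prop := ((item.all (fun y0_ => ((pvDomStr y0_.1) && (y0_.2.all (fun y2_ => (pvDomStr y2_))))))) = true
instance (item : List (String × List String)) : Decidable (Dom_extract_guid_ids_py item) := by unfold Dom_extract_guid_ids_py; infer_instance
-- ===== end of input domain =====

-- B replaces A's single fused loop over two mutable accumulators by two independent
-- first-match scans, one per id category (objective: idiomatic decomposition).

-- shared helper: str.partition("://") restricted to the two components both Pythons use,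
-- (prefix, raw_id); exact port of the missing primitive (PySem has no partition)
def pyPartitionGuid (cs : List Char) : List Char × List Char :=
  let i := PySem.Chars.find cs [':', '/', '/']
  if i = -1 then (cs, []) else (cs.take i.toNat, cs.drop (i.toNat + 3))

-- ===== PORT A =====
-- loop body of A: parse one guid, fill each still-empty accumulator on a prefix match
def stepA (st : Option Int × Option Int) (g : String) : Option Int × Option Int :=
  let pr := (pyPartitionGuid g.toList).1
  let raw := (pyPartitionGuid g.toList).2
  if PySem.Chars.strIsdigit raw = false then st
  else
    -- int(raw_id): raw is a nonempty digit string here, so ofChars? is always `some`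
    let n : Int := (PySem.Int.ofChars? raw).getD 0
    let st1 := if ((pr == "tmdb".toList || pr == "com.plexapp.agents.themoviedb".toList) && st.1.isNone) = true
               then (some n, st.2) else st
    if ((pr == "tvdb".toList || pr == "com.plexapp.agents.thetvdb".toList) && st1.2.isNone) = true
    then (st1.1, some n) else st1

def extract_guid_ids_py (item : List (String × List String)) : Option Int × Option Int :=
  -- item.get("guids"): association-list lookup, first match; the isinstance guard maps a
  -- missing key to the empty iteration (a present value is a list under the type convention)
  let guid_values := (item.find? (fun kv => kv.1 == "guids")).map (·.2)
  let guids := guid_values.getD []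
  guids.foldl stepA (none, none)

-- ===== PORT B =====
-- _first_guid_id: first guid whose raw id is digits and whose prefix is p1 or p2
def firstGuidId (guids : List String) (p1 p2 : List Char) : Option Int :=
  match guids with
  | [] => none
  | g :: rest =>
    let pr := (pyPartitionGuid g.toList).1
    let raw := (pyPartitionGuid g.toList).2
    if (PySem.Chars.strIsdigit raw && (pr == p1 || pr == p2)) = true
    then some ((PySem.Int.ofChars? raw).getD 0)
    else firstGuidId rest p1 p2

def extract_guid_ids_py_alt (item : List (String × List String)) : Option Int × Option Int :=
  let guids := ((item.find? (fun kv => kv.1 == "guids")).map (·.2)).getD []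
  (firstGuidId guids "tmdb".toList "com.plexapp.agents.themoviedb".toList,
   firstGuidId guids "tvdb".toList "com.plexapp.agents.thetvdb".toList)

-- ===== PRECONDITION & SPEC =====
def Spec_extract_guid_ids_py (item : List (String × List String)) (out : Option Int × Option Int) : Prop := out = extract_guid_ids_py_alt item
instance (item : List (String × List String)) (out : Option Int × Option Int) : Decidable (Spec_extract_guid_ids_py item out) := by unfold Spec_extract_guid_ids_py; infer_instance

-- ===== CLAIM =====
def Claim_equal_extract_guid_ids_py : Prop := ∀ (item : List (String × List String)), Dom_extract_guid_ids_py item → Spec_extract_guid_ids_py item (extract_guid_ids_py item)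

-- ===== LEMMAS AND PROOFS =====
-- loop invariant: A's fold from state (a, b) fills each component, independently,
-- with the first matching id of its own category
lemma foldA_eq (guids : List String) (a b : Option Int) :
    guids.foldl stepA (a, b) =
      (a.or (firstGuidId guids "tmdb".toList "com.plexapp.agents.themoviedb".toList),
       b.or (firstGuidId guids "tvdb".toList "com.plexapp.agents.thetvdb".toList)) := by
  induction guids generalizing a b with
  | nil => simp [firstGuidId]
  | cons g rest ih =>
    simp only [List.foldl_cons, stepA, firstGuidId]
    cases hd : PySem.Chars.strIsdigit (pyPartitionGuid g.toList).2 with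
    | false => simp [ih]
    | true =>
      cases htm : ((pyPartitionGuid g.toList).1 == "tmdb".toList ||
                   (pyPartitionGuid g.toList).1 == "com.plexapp.agents.themoviedb".toList) <;>
      cases htv : ((pyPartitionGuid g.toList).1 == "tvdb".toList ||
                   (pyPartitionGuid g.toList).1 == "com.plexapp.agents.thetvdb".toList) <;>
      cases a <;> cases b <;>
      simp_all

-- ===== VERDICT =====
theorem extract_guid_ids_py_spec : Claim_equal_extract_guid_ids_py := by
  intro item _
  unfold Spec_extract_guid_ids_py extract_guid_ids_py extract_guid_ids_py_alt
  simp [foldA_eq]
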